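-- pv_equiv track=rewrite | github.com/T1MM0/squadbox-sbox | mmry_packer_v2.py | _is_structured_content
-- ===== SOURCE A (Python) =====
-- def _is_structured_content(data: str) -> bool:
--     """Check if data appears to be structured (code, markup, etc.)"""
--     structured_indicators = [
--         '{', '}', '<', '>', '(', ')', '[', ']',  # Brackets
--         'function', 'class', 'def', 'import',    # Code keywords
--         'margin:', 'padding:', 'color:',         # CSS
--         '<!DOCTYPE', '<html', '<div'             # HTML
--     ]
--
--     return any(indicator in data for indicator in structured_indicators)
-- ===== SOURCE B (Python) =====
-- def _is_structured_content(data: str) -> bool: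
--     """Check if data appears to be structured (code, markup, etc.)"""
--     # Any bracket character already decides the answer; the HTML indicators
--     # ('<!DOCTYPE', '<html', '<div') all contain '<' and are therefore redundant.
--     if any(c in '{}<>()[]' for c in data):
--         return True
--     return any(kw in data for kw in ('function', 'class', 'def', 'import',
--                                      'margin:', 'padding:', 'color:'))
-- ===== Notes on version B (the rewrite author's own statement) =====
-- stated objective: simpler
-- what changed: B replaces A's 17 independent substring scans by one character-set pass that decides all eight bracket indicators at once (the three HTML indicators are provably redundant, each containing '<'), followed by only the seven keyword substring checks.
import Mathlib
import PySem

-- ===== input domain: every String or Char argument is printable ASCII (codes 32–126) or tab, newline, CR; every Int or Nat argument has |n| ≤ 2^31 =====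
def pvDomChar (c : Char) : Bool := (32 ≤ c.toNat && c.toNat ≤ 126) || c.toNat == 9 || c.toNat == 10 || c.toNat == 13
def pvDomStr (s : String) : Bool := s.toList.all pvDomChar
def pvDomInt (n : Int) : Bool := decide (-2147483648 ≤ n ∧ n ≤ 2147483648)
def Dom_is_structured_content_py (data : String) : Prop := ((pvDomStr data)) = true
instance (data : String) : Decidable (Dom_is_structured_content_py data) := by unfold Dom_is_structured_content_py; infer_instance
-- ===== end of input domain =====

-- B drops A's three redundant HTML indicators (each contains '<', already an indicator)
-- and decides all eight bracket indicators in one character-set pass; objective: simpler.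


-- ===== PORT A =====
def is_structured_content_py (data : String) : Bool :=
  ([ "{", "}", "<", ">", "(", ")", "[", "]",
     "function", "class", "def", "import",
     "margin:", "padding:", "color:",
     "<!DOCTYPE", "<html", "<div" ] : List String).any
    (fun indicator => PySem.Str.isIn indicator data)

-- ===== PORT B =====
def is_structured_content_py_alt (data : String) : Bool :=
  if data.toList.any (fun c => ("{}<>()[]" : String).toList.contains c) then
    true
  else
    ([ "function", "class", "def", "import",
       "margin:", "padding:", "color:" ] : List String).any
      (fun kw => PySem.Str.isIn kw data)

-- ===== PRECONDITION & SPEC =====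
def Spec_is_structured_content_py (data : String) (out : Bool) : Prop := out = is_structured_content_py_alt data
instance (data : String) (out : Bool) : Decidable (Spec_is_structured_content_py data out) := by unfold Spec_is_structured_content_py; infer_instance

-- ===== CLAIM (what is proved, stated in full; the proofs are below) =====
def Claim_equal_is_structured_content_py : Prop := ∀ (data : String), Dom_is_structured_content_py data → Spec_is_structured_content_py data (is_structured_content_py data)

-- ===== LEMMAS AND PROOFS =====

-- '<' occurs in data whenever one of the '<'-headed indicators does
theorem lt_mem_of_isIn (sub data : String) (hsub : '<' ∈ sub.toList)
    (h : PySem.Str.isIn sub data = true) : '<' ∈ data.toList :=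
  ((PySem.Str.isIn_iff_infix sub data).mp h).subset hsub

-- a single-character indicator is in data iff the character occurs in data
theorem isIn_single_iff (c : Char) (s data : String) (hs : s.toList = [c]) :
    PySem.Str.isIn s data = true ↔ c ∈ data.toList := by
  rw [PySem.Str.isIn_iff_infix, hs]
  exact List.singleton_infix_iff c data.toList

-- the bracket character-set pass of B fires iff some bracket character occurs in data
theorem bracket_any_iff (data : String) :
    data.toList.any (fun c => ("{}<>()[]" : String).toList.contains c) = true ↔
      ∃ c ∈ data.toList, c ∈ ['{', '}', '<', '>', '(', ')', '[', ']'] := by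
  simp [List.any_eq_true]

-- ===== VERDICT (by name: the statement is the Claim_ definition above) =====
theorem is_structured_content_py_spec : Claim_equal_is_structured_content_py := by
  intro data _
  unfold Spec_is_structured_content_py
  by_cases hb : data.toList.any (fun c => ("{}<>()[]" : String).toList.contains c) = true
  · -- a bracket character occurs: B is true, and A has the matching single-char indicator
    rw [is_structured_content_py_alt, if_pos hb]
    obtain ⟨c, hc, hm⟩ := (bracket_any_iff data).mp hb
    fin_cases hm
    · exact List.any_eq_true.mpr ⟨"{", by decide, (isIn_single_iff '{' "{" data rfl).mpr hc⟩
    · exact List.any_eq_true.mpr ⟨"}", by decide, (isIn_single_iff '}' "}" data rfl).mpr hc⟩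
    · exact List.any_eq_true.mpr ⟨"<", by decide, (isIn_single_iff '<' "<" data rfl).mpr hc⟩
    · exact List.any_eq_true.mpr ⟨">", by decide, (isIn_single_iff '>' ">" data rfl).mpr hc⟩
    · exact List.any_eq_true.mpr ⟨"(", by decide, (isIn_single_iff '(' "(" data rfl).mpr hc⟩
    · exact List.any_eq_true.mpr ⟨")", by decide, (isIn_single_iff ')' ")" data rfl).mpr hc⟩
    · exact List.any_eq_true.mpr ⟨"[", by decide, (isIn_single_iff '[' "[" data rfl).mpr hc⟩
    · exact List.any_eq_true.mpr ⟨"]", by decide, (isIn_single_iff ']' "]" data rfl).mpr hc⟩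
  · -- no bracket character: every bracket / HTML indicator of A fails, keywords remain
    rw [is_structured_content_py_alt, if_neg hb]
    have noChar : ∀ c : Char, c ∈ ['{', '}', '<', '>', '(', ')', '[', ']'] →
        c ∉ data.toList := fun c hm hc => hb ((bracket_any_iff data).mpr ⟨c, hc, hm⟩)
    rw [Bool.eq_iff_iff]
    constructor
    · intro hA
      obtain ⟨ind, hind, hIn⟩ := List.any_eq_true.mp hA
      fin_cases hind
      · exact absurd ((isIn_single_iff '{' "{" data rfl).mp hIn) (noChar '{' (by decide))
      · exact absurd ((isIn_single_iff '}' "}" data rfl).mp hIn) (noChar '}' (by decide))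
      · exact absurd ((isIn_single_iff '<' "<" data rfl).mp hIn) (noChar '<' (by decide))
      · exact absurd ((isIn_single_iff '>' ">" data rfl).mp hIn) (noChar '>' (by decide))
      · exact absurd ((isIn_single_iff '(' "(" data rfl).mp hIn) (noChar '(' (by decide))
      · exact absurd ((isIn_single_iff ')' ")" data rfl).mp hIn) (noChar ')' (by decide))
      · exact absurd ((isIn_single_iff '[' "[" data rfl).mp hIn) (noChar '[' (by decide))
      · exact absurd ((isIn_single_iff ']' "]" data rfl).mp hIn) (noChar ']' (by decide))
      · exact List.any_eq_true.mpr ⟨"function", by decide, hIn⟩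
      · exact List.any_eq_true.mpr ⟨"class", by decide, hIn⟩
      · exact List.any_eq_true.mpr ⟨"def", by decide, hIn⟩
      · exact List.any_eq_true.mpr ⟨"import", by decide, hIn⟩
      · exact List.any_eq_true.mpr ⟨"margin:", by decide, hIn⟩
      · exact List.any_eq_true.mpr ⟨"padding:", by decide, hIn⟩
      · exact List.any_eq_true.mpr ⟨"color:", by decide, hIn⟩
      · exact absurd (lt_mem_of_isIn "<!DOCTYPE" data (by decide) hIn) (noChar '<' (by decide))
      · exact absurd (lt_mem_of_isIn "<html" data (by decide) hIn) (noChar '<' (by decide))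
      · exact absurd (lt_mem_of_isIn "<div" data (by decide) hIn) (noChar '<' (by decide))
    · intro hB
      obtain ⟨kw, hkw, hIn⟩ := List.any_eq_true.mp hB
      fin_cases hkw
      · exact List.any_eq_true.mpr ⟨"function", by decide, hIn⟩
      · exact List.any_eq_true.mpr ⟨"class", by decide, hIn⟩
      · exact List.any_eq_true.mpr ⟨"def", by decide, hIn⟩
      · exact List.any_eq_true.mpr ⟨"import", by decide, hIn⟩
      · exact List.any_eq_true.mpr ⟨"margin:", by decide, hIn⟩
      · exact List.any_eq_true.mpr ⟨"padding:", by decide, hIn⟩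
      · exact List.any_eq_true.mpr ⟨"color:", by decide, hIn⟩
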